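-- pv_equiv track=rewrite | github.com/jensenerik/aoc2023 | solutions/solution12.py | check_spring
-- ===== SOURCE A (Python) =====
-- from typing import Dict, List, NamedTuple, Optional, Tuple
--
-- def check_spring(spring_map: List[str], contiguous_cnt: List[int]) -> bool:
--     test_streaks: List[int] = []
--     current_streak = 0
--     for loc in spring_map:
--         if loc == "#":
--             current_streak += 1
--         elif loc == ".":
--             if current_streak:
--                 test_streaks.append(current_streak)
--                 current_streak = 0
--     if current_streak:
--         test_streaks.append(current_streak)
--     return test_streaks == contiguous_cnt
-- ===== SOURCE B (Python) =====
-- def check_spring(spring_map, contiguous_cnt):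
--     # Early-exit run matcher: scan each run of "#" and consume the expected
--     # counts one by one instead of building a list of streaks first.
--     cells = [c for c in spring_map if c in ("#", ".")]
--     counts = list(contiguous_cnt)
--     while cells:
--         if cells[0] == "#":
--             run = 0
--             while run < len(cells) and cells[run] == "#":
--                 run += 1
--             if not counts or counts[0] != run:
--                 return False
--             counts = counts[1:]
--             cells = cells[run:]
--         else:
--             cells = cells[1:]
--     return not counts
-- ===== Notes on version B (the rewrite author's own statement) =====
-- stated objective: alternative
-- what changed: Replaces A's streak-accumulator fold that builds the whole streak list and compares it at the end with an early-exit matcher that scans each run of '#' in the filtered cells and consumes the expected counts one by one, returning False at the first mismatching run.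
import Mathlib
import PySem

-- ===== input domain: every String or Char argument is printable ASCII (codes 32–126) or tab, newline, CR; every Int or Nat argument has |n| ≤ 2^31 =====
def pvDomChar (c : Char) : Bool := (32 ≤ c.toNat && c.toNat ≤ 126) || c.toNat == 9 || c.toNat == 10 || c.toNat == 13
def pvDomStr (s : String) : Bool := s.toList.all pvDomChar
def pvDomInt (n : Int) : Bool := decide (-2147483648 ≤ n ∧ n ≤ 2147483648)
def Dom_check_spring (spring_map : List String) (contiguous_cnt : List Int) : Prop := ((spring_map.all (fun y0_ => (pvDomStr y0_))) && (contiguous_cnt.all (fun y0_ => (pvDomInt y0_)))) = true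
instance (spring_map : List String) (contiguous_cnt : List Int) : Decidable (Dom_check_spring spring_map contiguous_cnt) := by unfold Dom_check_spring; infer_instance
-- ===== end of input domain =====

-- B replaces A's streak-list accumulator with an early-exit run matcher (alternative decomposition, same cost).

-- ===== PORT A =====
def check_spring (spring_map : List String) (contiguous_cnt : List Int) : Bool :=
  -- fold state = (test_streaks, current_streak), exactly A's loop
  let st := spring_map.foldl
    (fun (p : List Int × Int) loc =>
      if loc == "#" then (p.1, p.2 + 1)
      else if loc == "." then (if p.2 ≠ 0 then (p.1 ++ [p.2], 0) else p)
      else p)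
    (([] : List Int), (0 : Int))
  let ts := if st.2 ≠ 0 then st.1 ++ [st.2] else st.1
  ts == contiguous_cnt

-- ===== PORT B =====
-- inner while loop of Source B: length of the leading run of "#"
def pvRunLen : List String → Nat
  | [] => 0
  | c :: r => if c == "#" then pvRunLen r + 1 else 0

-- outer while loop of Source B: consume one run of "#" (or one ".") per step
def pvGoB : List String → List Int → Bool
  | [], counts => counts.isEmpty
  | c :: rest, counts =>
    if c == "#" then
      let run := pvRunLen (c :: rest)
      match counts with
      | [] => false
      | n :: counts' =>
        if n ≠ (run : Int) then false
        else pvGoB ((c :: rest).drop run) counts'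
    else pvGoB rest counts
termination_by cells _ => cells.length
decreasing_by
  · simp only [List.length_drop, pvRunLen]
    simp_all
  · simp

def check_spring_alt (spring_map : List String) (contiguous_cnt : List Int) : Bool :=
  pvGoB (spring_map.filter (fun c => c == "#" || c == ".")) contiguous_cnt

-- ===== PRECONDITION & SPEC =====
def Spec_check_spring (spring_map : List String) (contiguous_cnt : List Int) (out : Bool) : Prop := out = check_spring_alt spring_map contiguous_cnt
instance (spring_map : List String) (contiguous_cnt : List Int) (out : Bool) : Decidable (Spec_check_spring spring_map contiguous_cnt out) := by unfold Spec_check_spring; infer_instance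

-- ===== CLAIM (what is proved, stated in full; the proofs are below) =====
def Claim_equal_check_spring : Prop := ∀ (spring_map : List String) (contiguous_cnt : List Int), Dom_check_spring spring_map contiguous_cnt → Spec_check_spring spring_map contiguous_cnt (check_spring spring_map contiguous_cnt)

-- ===== LEMMAS AND PROOFS =====

-- canonical streak list, parametrised by the running streak
def pvRuns : Int → List String → List Int
  | cur, [] => if cur ≠ 0 then [cur] else []
  | cur, loc :: r =>
    if loc == "#" then pvRuns (cur + 1) r
    else if loc == "." then (if cur ≠ 0 then cur :: pvRuns 0 r else pvRuns 0 r)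
    else pvRuns cur r

lemma pvRuns_loopA (sm : List String) (ts : List Int) (cur : Int) :
    (let st := sm.foldl
      (fun (p : List Int × Int) loc =>
        if loc == "#" then (p.1, p.2 + 1)
        else if loc == "." then (if p.2 ≠ 0 then (p.1 ++ [p.2], 0) else p)
        else p) (ts, cur)
     if st.2 ≠ 0 then st.1 ++ [st.2] else st.1) = ts ++ pvRuns cur sm := by
  induction sm generalizing ts cur with
  | nil => simp only [List.foldl_nil, pvRuns]; split_ifs <;> simp
  | cons loc r ih =>
    simp only [List.foldl_cons]
    by_cases h1 : loc = "#"
    · simpa [h1, pvRuns] using ih ts (cur + 1)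
    · by_cases h2 : loc = "."
      · by_cases h3 : cur = 0
        · simpa [h1, h2, h3, pvRuns] using ih ts 0
        · simpa [h1, h2, h3, pvRuns] using ih (ts ++ [cur]) 0
      · simpa [h1, h2, pvRuns] using ih ts cur

lemma pvRuns_filter (cur : Int) (sm : List String) :
    pvRuns cur (sm.filter (fun c => c == "#" || c == ".")) = pvRuns cur sm := by
  induction sm generalizing cur with
  | nil => rfl
  | cons loc r ih =>
    by_cases h1 : loc = "#"
    · simp [h1, pvRuns, ih]
    · by_cases h2 : loc = "."
      · simp [h2, pvRuns, ih]
      · simp [pvRuns, h1, h2, ih]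

lemma pvRuns_pos (cells : List String) (cur : Int) (hc : 0 < cur)
    (h : ∀ x ∈ cells, x = "#" ∨ x = ".") :
    pvRuns cur cells = (cur + (pvRunLen cells : Int)) :: pvRuns 0 (cells.drop (pvRunLen cells)) := by
  induction cells generalizing cur with
  | nil => simp [pvRuns, pvRunLen]; omega
  | cons c r ih =>
    rcases h c (by simp) with h1 | h1
    · subst h1
      simp only [pvRuns, pvRunLen]
      simp only [BEq.rfl, if_true, List.drop_succ_cons]
      rw [ih (cur + 1) (by omega) (by intro x hx; exact h x (List.mem_cons_of_mem _ hx))]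
      congr 1
      push_cast
      ring
    · simp [h1, pvRuns, pvRunLen, hc.ne']

lemma pvRuns_zero_hash (rest : List String) (h : ∀ x ∈ rest, x = "#" ∨ x = ".") :
    pvRuns 0 ("#" :: rest)
      = ((pvRunLen ("#" :: rest) : Int)) :: pvRuns 0 (rest.drop (pvRunLen rest)) := by
  have h1 := pvRuns_pos rest 1 (by omega) h
  simp [pvRuns, pvRunLen, h1]
  ring

lemma pvGoB_eq_runs (cells : List String) (cnt : List Int) :
    (∀ x ∈ cells, x = "#" ∨ x = ".") → pvGoB cells cnt = (pvRuns 0 cells == cnt) := by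
  induction cells, cnt using pvGoB.induct with
  | case1 counts => intro _; cases counts <;> simp [pvGoB, pvRuns]
  | case2 c rest hc =>
    intro h
    have hc' : c = "#" := by simpa using hc
    subst hc'
    rw [pvRuns_zero_hash rest (fun x hx => h x (List.mem_cons_of_mem _ hx))]
    simp [pvGoB]
  | case3 c rest hc run n counts' hn =>
    intro h
    have hc' : c = "#" := by simpa using hc
    subst hc'
    have hrun : run = pvRunLen ("#" :: rest) := rfl
    rw [hrun] at hn
    rw [pvRuns_zero_hash rest (fun x hx => h x (List.mem_cons_of_mem _ hx))]
    simp [pvGoB, hn, List.cons_beq_cons]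
    intro habs
    exact absurd habs.symm (by simpa using hn)
  | case4 c rest hc run n counts' hn ih =>
    intro h
    have hc' : c = "#" := by simpa using hc
    subst hc'
    have hrun : run = pvRunLen ("#" :: rest) := rfl
    rw [hrun] at hn
    have hn' : n = ((pvRunLen ("#" :: rest) : Int)) := not_ne_iff.mp hn
    have hdrop : (("#" :: rest).drop (pvRunLen ("#" :: rest))) = rest.drop (pvRunLen rest) := by
      simp [pvRunLen]
    rw [pvRuns_zero_hash rest (fun x hx => h x (List.mem_cons_of_mem _ hx))]
    simp only [pvGoB, hn, if_false]
    rw [ih (fun x hx => h x (List.mem_of_mem_drop hx)), hdrop]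
    simp [List.cons_beq_cons, hn']
  | case5 c rest counts hc ih =>
    intro h
    have hc' : c = "." := by
      rcases h c (by simp) with h1 | h1
      · exact absurd (by simp [h1]) hc
      · exact h1
    subst hc'
    simp only [pvGoB]
    rw [ih (fun x hx => h x (List.mem_cons_of_mem _ hx))]
    simp [pvRuns]

theorem check_spring_eq (sm : List String) (cnt : List Int) :
    check_spring sm cnt = check_spring_alt sm cnt := by
  have hA := pvRuns_loopA sm [] 0
  have hB := pvGoB_eq_runs (sm.filter (fun c => c == "#" || c == ".")) cnt
    (by intro x hx; rcases List.mem_filter.mp hx with ⟨-, hx⟩; simp at hx; tauto)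
  simp only [check_spring, check_spring_alt, hB, pvRuns_filter]
  rw [hA]; simp

-- ===== VERDICT (by name: the statement is the Claim_ definition above) =====
theorem check_spring_spec : Claim_equal_check_spring := by
  intro sm cnt _
  unfold Spec_check_spring
  exact check_spring_eq sm cnt
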